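-- pv_equiv track=rewrite | github.com/mdomnita/hackerrank-python | strings/designer-door-mat.py | generateMat
-- ===== SOURCE A (Python) =====
-- def generateMat(n):
--     n = int(n)
--     m = 3*n
--     lines = []
--     mid = n//2
--     for i in range(mid):
--         string = '.|.'*(2*i+1)
--         line = string.center(m,'-')
--         lines.append(line)
--     string = 'WELCOME'
--     line = string.center(m,'-')
--     lines.append(line)
--     for i in range(mid,0,-1):
--         string = '.|.'*(2*(i-1)+1)
--         line = string.center(m,'-')
--         lines.append(line)
--     return '\n'.join(lines)
-- ===== SOURCE B (Python) =====
-- def generateMat(n):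
--     n = int(n)
--     m = 3 * n
--     mid = n // 2
--     rows = ['WELCOME' if r == mid else '.|.' * (2 * (mid - abs(r - mid)) + 1)
--             for r in range(2 * mid + 1)]
--     return '\n'.join(row.center(m, '-') for row in rows)
-- ===== Notes on version B (the rewrite author's own statement) =====
-- stated objective: simpler
-- what changed: B replaces A's two separate accumulating loops (ascending top half, descending bottom half) plus a middle-row append with a single comprehension over all row indices, deriving each row's repeat count in closed form from its distance to the middle row.
-- outside the precondition, e.g. on generateMat(-3): A returns 'WELCOME', B returns ''
import Mathlib
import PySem

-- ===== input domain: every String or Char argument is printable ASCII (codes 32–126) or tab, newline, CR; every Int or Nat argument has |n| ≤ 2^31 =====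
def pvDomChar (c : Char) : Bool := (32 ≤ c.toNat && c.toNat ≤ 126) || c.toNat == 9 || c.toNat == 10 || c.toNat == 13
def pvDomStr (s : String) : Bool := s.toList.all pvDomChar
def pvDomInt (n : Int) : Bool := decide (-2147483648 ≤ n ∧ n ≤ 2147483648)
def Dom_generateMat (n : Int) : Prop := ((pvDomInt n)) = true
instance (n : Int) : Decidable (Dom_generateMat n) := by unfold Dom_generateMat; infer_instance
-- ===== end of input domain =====

-- B replaces A's two accumulating loops + middle append by one comprehension with a
-- closed formula for each row's repeat count; objective: simpler.

-- shared models of Python builtins used by BOTH sources: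
-- s * k (string repetition; empty for k ≤ 0) — exact
def pyRep (s : String) (k : Int) : String :=
  String.mk ((List.replicate k.toNat s.toList).flatten)

-- s.center(w, '-') — exact CPython rule: if w ≤ len(s) return s, else
-- left margin = marg//2 + (marg & w & 1) dashes (marg, w > 0 here, so the
-- bitwise AND is 1 iff marg and w are both odd)
def pyCenter (s : String) (w : Int) : String :=
  let L : Int := PySem.Str.len s
  if w ≤ L then s
  else
    let marg := w - L
    let lft := PySem.Int.floordiv marg 2 +
      (if PySem.Int.mod marg 2 = 1 ∧ PySem.Int.mod w 2 = 1 then (1 : Int) else 0)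
    String.mk (List.replicate lft.toNat '-' ++ s.toList ++ List.replicate (marg - lft).toNat '-')

-- ===== PORT A =====
def generateMat (n : Int) : String :=
  let m := 3 * n
  let mid := PySem.Int.floordiv n 2
  let lines : List String :=
    (PySem.List.pyRange 0 mid 1).foldl
      (fun acc i => acc ++ [pyCenter (pyRep ".|." (2 * i + 1)) m]) []
  let lines := lines ++ [pyCenter "WELCOME" m]
  let lines :=
    (PySem.List.pyRange mid 0 (-1)).foldl
      (fun acc i => acc ++ [pyCenter (pyRep ".|." (2 * (i - 1) + 1)) m]) lines
  PySem.Str.join "\n" lines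

-- ===== PORT B =====
def generateMat_alt (n : Int) : String :=
  let m := 3 * n
  let mid := PySem.Int.floordiv n 2
  let rows : List String :=
    (PySem.List.pyRange 0 (2 * mid + 1) 1).map
      (fun r => if r = mid then "WELCOME" else pyRep ".|." (2 * (mid - |r - mid|) + 1))
  PySem.Str.join "\n" (rows.map (fun row => pyCenter row m))

-- ===== PRECONDITION & SPEC =====
-- Pre_ excludes negative n, which lies outside the natural domain of a mat height;
-- there A returns the bare WELCOME row while B returns the empty string.
def Pre_generateMat (n : Int) : Prop := 0 ≤ n
instance (n : Int) : Decidable (Pre_generateMat n) := by unfold Pre_generateMat; infer_instance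
def pvWitness_generateMat : Int := (7)

def Spec_generateMat (n : Int) (out : String) : Prop := out = generateMat_alt n
instance (n : Int) (out : String) : Decidable (Spec_generateMat n out) := by unfold Spec_generateMat; infer_instance

-- ===== CLAIM (what is proved, stated in full; the proofs are below) =====
def Claim_equal_generateMat : Prop := ∀ (n : Int), Dom_generateMat n → Pre_generateMat n → Spec_generateMat n (generateMat n)

-- ===== LEMMAS AND PROOFS =====

-- the row lists agree: top half ++ middle ++ mirrored top half, versus one map with
-- the closed repeat-count formula mid - |r - mid|
theorem mat_rows {β : Type} (f : Int → β) (w : β) (k : Nat) :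
    ((List.range k).map (fun (x : Nat) => f (x : Int))) ++ [w]
      ++ (List.range k).map (fun (x : Nat) => f ((k : Int) - ((x : Int) + 1)))
    = (List.range (2 * k + 1)).map
        (fun (x : Nat) => if x = k then w
                  else f ((k : Int) - |(x : Int) - (k : Int)|)) := by
  apply List.ext_getElem
  · simp; omega
  · intro i h1 h2
    simp only [List.length_map, List.length_range] at h2
    rcases lt_trichotomy i k with hik | hik | hik
    · rw [List.getElem_append_left (by simp; omega),
        List.getElem_append_left (by simpa using hik)]
      simp only [List.getElem_map, List.getElem_range]
      rw [if_neg (Nat.ne_of_lt hik)]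
      rw [abs_of_nonpos (by omega)]
      congr 1
      ring
    · subst hik
      rw [List.getElem_append_left (by simp),
        List.getElem_append_right (by simp)]
      simp
    · rw [List.getElem_append_right (by simp; omega)]
      simp only [List.getElem_map, List.getElem_range, List.length_append, List.length_map,
        List.length_range, List.length_cons, List.length_nil]
      rw [if_neg (Nat.ne_of_gt hik)]
      rw [abs_of_nonneg (by omega)]
      congr 1
      have h3 : ((i - (k + 0 + 1) : Nat) : Int) = (i : Int) - (k : Int) - 1 := by
        push_cast [Nat.cast_sub (show k + 0 + 1 ≤ i by omega)]
        ring
      push_cast [h3]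
      ring

theorem generateMat_spec : Claim_equal_generateMat := by
  intro n _ hn
  unfold Spec_generateMat generateMat generateMat_alt
  have hmid : 0 ≤ PySem.Int.floordiv n 2 := by
    rw [PySem.Int.floordiv_eq_ediv_of_pos (by omega)]
    exact Int.ediv_nonneg hn (by omega)
  obtain ⟨k, hk⟩ := Int.eq_ofNat_of_zero_le hmid
  simp only [PySem.List.foldl_append_singleton_eq_map, List.nil_append, List.map_map, hk]
  rw [PySem.List.pyRange_one, PySem.List.pyRange_neg_one, PySem.List.pyRange_one]
  have e1 : ((k : Int) - 0).toNat = k := by omega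
  have e3 : (2 * (k : Int) + 1 - 0).toNat = 2 * k + 1 := by omega
  rw [e1, e3]
  congr 1
  have h := mat_rows (fun x => pyCenter (pyRep ".|." (2 * x + 1)) (3 * n))
    (pyCenter "WELCOME" (3 * n)) k
  simp only [Function.comp_def, apply_ite (fun s => pyCenter s (3 * n)), List.map_map] at h ⊢
  refine Eq.trans ?_ (Eq.trans h ?_)
  · simp [sub_sub]
  · simp [Nat.cast_inj]
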